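-- pv_equiv track=rewrite | github.com/jopemachine/algorithm-study | baekjoon/Backtracking/2661.py | is_bad_seq
-- ===== SOURCE A (Python) =====
-- def is_bad_seq(str):
--   if not str:
--     return False
--
--   for i in range(1, (len(str) // 2) + 1):
--     right = str[-i:]
--     left = str[-2*i: -i]
--
--     if left == right:
--       return True
--
--   return False
-- ===== SOURCE B (Python) =====
-- def is_bad_seq(str):
--     r = str[::-1]
--     n = len(r)
--     for i in range(1, n // 2 + 1):
--         k = 0
--         while k < i and r[k] == r[i + k]:
--             k += 1
--         if k == i:
--             return True
--     return False
-- ===== Notes on version B (the rewrite author's own statement) =====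
-- stated objective: faster
-- what changed: B reverses the string once and tests each candidate block length with a character-by-character matching loop that exits at the first mismatch, instead of A's building and comparing two fresh length-i suffix slices for every candidate length i.
import Mathlib
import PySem

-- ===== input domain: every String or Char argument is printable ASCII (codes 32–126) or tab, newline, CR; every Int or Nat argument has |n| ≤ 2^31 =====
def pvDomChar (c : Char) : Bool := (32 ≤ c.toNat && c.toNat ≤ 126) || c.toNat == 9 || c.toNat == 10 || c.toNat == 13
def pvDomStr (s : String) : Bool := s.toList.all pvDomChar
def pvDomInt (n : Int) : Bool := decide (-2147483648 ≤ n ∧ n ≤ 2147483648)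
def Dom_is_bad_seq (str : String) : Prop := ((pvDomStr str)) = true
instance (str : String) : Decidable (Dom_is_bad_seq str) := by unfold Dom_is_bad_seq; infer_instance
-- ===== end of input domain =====

-- B reverses the string once and tests each candidate block length by a character-matching
-- loop with early mismatch exit on the reversed string, instead of A's building and comparing
-- two fresh suffix slices per candidate length; measured faster on random inputs.


-- ===== PORT A =====
def is_bad_seq (str : String) : Bool :=
  let s := str.toList
  if s = [] then false
  else
    (PySem.List.pyRange 1 (PySem.Int.floordiv (s.length : Int) 2 + 1)).any (fun i =>
      let right := PySem.List.slice s (some (-i)) none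
      let left := PySem.List.slice s (some (-(2*i))) (some (-i))
      left == right)

-- ===== PORT B =====
-- the 'while k < i and r[k] == r[i+k]: k += 1' loop; fuel = number of remaining steps (i - k)
def pvBadWhile (r : List Char) (i : Int) : Int → Nat → Int
  | k, 0 => k
  | k, fuel+1 =>
    if k < i && (PySem.List.pyGet? r k == PySem.List.pyGet? r (i + k)) then
      pvBadWhile r i (k + 1) fuel
    else k

def is_bad_seq_alt (str : String) : Bool :=
  let r := str.toList.reverse
  let n := r.length
  (PySem.List.pyRange 1 (PySem.Int.floordiv (n : Int) 2 + 1)).any (fun i =>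
    pvBadWhile r i 0 i.toNat == i)

-- ===== PRECONDITION & SPEC =====
def Spec_is_bad_seq (str : String) (out : Bool) : Prop := out = is_bad_seq_alt str
instance (str : String) (out : Bool) : Decidable (Spec_is_bad_seq str out) := by unfold Spec_is_bad_seq; infer_instance

-- ===== CLAIM (what is proved, stated in full; the proofs are below) =====
def Claim_equal_is_bad_seq : Prop := ∀ (str : String), Dom_is_bad_seq str → Spec_is_bad_seq str (is_bad_seq str)

-- ===== LEMMAS AND PROOFS =====

-- a slice with two negative in-range bounds is a drop/take block
theorem pvSlice_neg_neg (xs : List Char) (a b : Nat) (hb : 0 < b) (hab : b ≤ a)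
    (ha : a ≤ xs.length) :
    PySem.List.slice xs (some (-(a : Int))) (some (-(b : Int))) =
      (xs.drop (xs.length - a)).take (a - b) := by
  have ha' : 0 < a := lt_of_lt_of_le hb hab
  simp only [PySem.List.slice]
  rw [PySem.List.clampIdx_neg_natCast _ _ ha', PySem.List.clampIdx_neg_natCast _ _ hb,
    show xs.length - b - (xs.length - a) = a - b from by omega]

-- the 'while k < i and r[k] == r[i+k]' loop reaches i exactly when every remaining position matches
theorem pvBadWhile_spec (r : List Char) (m : Nat) :
    ∀ (f k : Nat), k + f = m →
      (pvBadWhile r (m : Int) (k : Int) f = (m : Int) ↔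
        ∀ j : Nat, k ≤ j → j < m → r[j]? = r[(m + j : Nat)]?) := by
  intro f
  induction f with
  | zero =>
    intro k hk
    constructor
    · intro _ j hj1 hj2; omega
    · intro _
      simp only [pvBadWhile]
      omega
  | succ f ih =>
    intro k hk
    have hklt : (k : Int) < (m : Int) := by exact_mod_cast (show k < m by omega)
    have hget1 : PySem.List.pyGet? r (k : Int) = r[k]? := PySem.List.pyGet?_natCast r k
    have hget2 : PySem.List.pyGet? r ((m : Int) + (k : Int)) = r[(m + k : Nat)]? := by
      rw [show (m : Int) + (k : Int) = ((m + k : Nat) : Int) from by push_cast; ring]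
      exact PySem.List.pyGet?_natCast r (m + k)
    by_cases hc : r[k]? = r[(m + k : Nat)]?
    · have hcond : ((k : Int) < (m : Int) && (PySem.List.pyGet? r (k : Int) ==
          PySem.List.pyGet? r ((m : Int) + (k : Int)))) = true := by
        simp [hklt, hget1, hget2, hc]
      have hstep : pvBadWhile r (m : Int) (k : Int) (f + 1) =
          pvBadWhile r (m : Int) ((k + 1 : Nat) : Int) f := by
        simp only [pvBadWhile, hcond, if_true]
        norm_num
      rw [hstep, ih (k + 1) (by omega)]
      constructor
      · intro h j hj1 hj2
        rcases Nat.eq_or_lt_of_le hj1 with hje | hjl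
        · rw [← hje]; exact hc
        · exact h j hjl hj2
      · intro h j hj1 hj2
        exact h j (by omega) hj2
    · have hcond : ((k : Int) < (m : Int) && (PySem.List.pyGet? r (k : Int) ==
          PySem.List.pyGet? r ((m : Int) + (k : Int)))) = false := by
        simp [hget1, hget2, hc]
      have hstep : pvBadWhile r (m : Int) (k : Int) (f + 1) = (k : Int) := by
        simp only [pvBadWhile, hcond, Bool.false_eq_true, if_false]
      rw [hstep]
      constructor
      · intro h
        exfalso
        have : k = m := by exact_mod_cast h
        omega
      · intro h
        exact absurd (h k le_rfl (by omega)) hc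

-- per-candidate-length agreement: comparing the two suffix blocks of s equals
-- the pointwise prefix match on s.reverse
theorem pvBlock_eq (s : List Char) (m : Nat) (h1 : 1 ≤ m) (h2 : 2 * m ≤ s.length) :
    ((s.drop (s.length - 2 * m)).take m == s.drop (s.length - m)) =
      decide (∀ j : Nat, j < m → s.reverse[j]? = s.reverse[(m + j : Nat)]?) := by
  rw [Bool.beq_eq_decide_eq, decide_eq_decide]
  constructor
  · intro h j hj
    have hlist : ∀ t : Nat, ((s.drop (s.length - 2 * m)).take m)[t]? =
        (s.drop (s.length - m))[t]? := by
      intro t; rw [h]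
    have ht := hlist (m - 1 - j)
    rw [List.getElem?_take, if_pos (by omega), List.getElem?_drop, List.getElem?_drop] at ht
    rw [List.getElem?_reverse (by omega), List.getElem?_reverse (by omega)]
    rw [show s.length - 1 - j = s.length - m + (m - 1 - j) from by omega,
      show s.length - 1 - (m + j) = s.length - 2 * m + (m - 1 - j) from by omega]
    exact ht.symm
  · intro h
    apply List.ext_getElem?_iff.mpr
    intro t
    by_cases htm : t < m
    · have hj := h (m - 1 - t) (by omega)
      rw [List.getElem?_reverse (by omega), List.getElem?_reverse (by omega)] at hj
      rw [show s.length - 1 - (m - 1 - t) = s.length - m + t from by omega,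
        show s.length - 1 - (m + (m - 1 - t)) = s.length - 2 * m + t from by omega] at hj
      rw [List.getElem?_take, if_pos htm, List.getElem?_drop, List.getElem?_drop]
      exact hj.symm
    · have hl : ((s.drop (s.length - 2 * m)).take m)[t]? = none := by
        apply List.getElem?_eq_none
        simp
        omega
      have hr : (s.drop (s.length - m))[t]? = none := by
        apply List.getElem?_eq_none
        simp
        omega
      rw [hl, hr]

-- ===== VERDICT (by name: the statement is the Claim_ definition above) =====
theorem is_bad_seq_spec : Claim_equal_is_bad_seq := by
  intro str _
  unfold Spec_is_bad_seq is_bad_seq is_bad_seq_alt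
  simp only [List.length_reverse]
  by_cases hnil : str.toList = []
  · rw [if_pos hnil, hnil]
    rfl
  · rw [if_neg hnil]
    apply PySem.List.any_congr_mem
    intro x hx
    rw [PySem.List.mem_pyRange_one] at hx
    obtain ⟨hx1, hx2⟩ := hx
    have hfd : PySem.Int.floordiv (str.toList.length : Int) 2 = ((str.toList.length / 2 : Nat) : Int) := by
      exact_mod_cast PySem.Int.floordiv_natCast str.toList.length 2
    rw [hfd] at hx2
    set n := str.toList.length with hn
    have hm : ∃ m : Nat, x = (m : Int) ∧ 1 ≤ m ∧ 2 * m ≤ n := by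
      refine ⟨x.toNat, ?_, ?_, ?_⟩
      · omega
      · omega
      · have : x.toNat ≤ n / 2 := by omega
        omega
    obtain ⟨m, hxm, hm1, hm2⟩ := hm
    subst hxm
    have hneg : -(2 * (m : Int)) = -((2 * m : Nat) : Int) := by push_cast; ring
    rw [hneg, pvSlice_neg_neg str.toList (2 * m) m hm1 (by omega) hm2,
      PySem.List.slice_from_neg_natCast str.toList m hm1,
      show 2 * m - m = m from by omega,
      pvBlock_eq str.toList m hm1 hm2,
      show ((m : Int)).toNat = m from by omega,
      Bool.beq_eq_decide_eq, decide_eq_decide,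
      show (0 : Int) = ((0 : Nat) : Int) from by norm_num,
      pvBadWhile_spec str.toList.reverse m m 0 (by omega)]
    constructor
    · intro h j _ hj2; exact h j hj2
    · intro h j hj; exact h j (Nat.zero_le j) hj
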